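-- pv_equiv track=rewrite | github.com/nivan/caminhosDiagonais | util.py | generateAllPaths
-- ===== SOURCE A (Python) =====
-- def normalizeEntry(entry):
--     _min = entry[0]
--     _index = 0
--
--     for i in range(len(entry)):
--         if entry[i] < _min:
--             _min = entry[i]
--             _index = i
--
--     return entry[_index:] + entry[0:_index]
--
-- def generateFirstPath(h):
--     #
--     numNewEntries = 8*h-2
--     first   = [1,2,4*h]
--     seed    = first + [3]
--     result  = [first,seed]
--     counter = 0
--     #
--     for t in range(4*h-4):
--         newEntry = [t for t in result[-1]]
--         if counter % 2 == 0:
--             newEntry[1] = (newEntry[1] + 2)%(4*h)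
--         else:
--             newEntry[3] = (newEntry[3] + 2)%(4*h)
--         result.append(newEntry)
--         counter+=1
--     #
--     mid1 = [1,4*h,4*h-1]
--     result.append(mid1)
--     ##########################
--     #
--     mid2    = [1,4*h,2]
--     result.append(mid2)
--     seed    = mid2 + [4*h-1]
--     result.append(seed)
--     counter = 0
--     for t in range(4*h-4):
--         newEntry = [t for t in result[-1]]
--         if counter % 2 == 0:
--             newEntry[1] = (newEntry[1] - 2)%(4*h)
--         else:
--             newEntry[3] = (newEntry[3] - 2)%(4*h)
--         result.append(newEntry)
--         counter+=1
--
--     #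
--     last = [1,2,3]
--     result.append(last)
--
--     return [normalizeEntry(t) for t in result]
--
-- def step(t,h,m):
--     result = (t+2)%m
--     return 4*h if result == 0 else result
--
-- def processEntry(entry, h, m):
--     return [step(t,h,m) for t in entry]
--
-- def generateAllPaths(h):
--     numPaths = 2*h
--     modulo   = 4*h
--     paths    = []
--
--     #first path
--     firstPath = generateFirstPath(h)
--     paths = []
--     paths.append(firstPath)
--
--     #
--     for i in range(1,numPaths):
--         prevPath = paths[i-1]
--         newPath = [processEntry(t,h,modulo) for t in prevPath]
--         paths.append([normalizeEntry(t) for t in newPath])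
--     #
--     return paths
-- ===== SOURCE B (Python) =====
-- def generateAllPaths(h):
--     # Closed forms throughout: the first path's raw entries are written directly
--     # by index formulas (no stateful copy-previous loop), normalization rotates to
--     # index(min(entry)), and path i is obtained straight from the first path by a
--     # single shift of 2*i on the 1..4h circle (the chained +2-mod steps telescope).
--     m = 4 * h
--
--     def normalize(entry):
--         j = entry.index(min(entry))
--         return entry[j:] + entry[:j]
--
--     raw = [[1, 2, m], [1, 2, m, 3]]
--     raw += [[1, 2 + 2 * ((k + 1) // 2), m, 3 + 2 * (k // 2)] for k in range(1, m - 3)]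
--     raw += [[1, m, m - 1], [1, m, 2], [1, m, 2, m - 1]]
--     raw += [[1, m - 2 * ((k + 1) // 2), 2, m - 1 - 2 * (k // 2)] for k in range(1, m - 3)]
--     raw += [[1, 2, 3]]
--     first = [normalize(e) for e in raw]
--
--     return [first] + [
--         [normalize([(v - 1 + 2 * i) % m + 1 for v in e]) for e in first]
--         for i in range(1, 2 * h)
--     ]
-- ===== Notes on version B (the rewrite author's own statement) =====
-- stated objective: alternative
-- what changed: B replaces A's two stateful copy-the-previous-entry loops by closed-form index formulas for the first path's raw entries, replaces the first-strict-minimum scan by index(min(entry)), and computes every later path directly from the first path with one shift (v-1+2*i) % (4*h) + 1 (the chained +2-mod steps telescope), removing the path-to-path dependency.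
import Mathlib
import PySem

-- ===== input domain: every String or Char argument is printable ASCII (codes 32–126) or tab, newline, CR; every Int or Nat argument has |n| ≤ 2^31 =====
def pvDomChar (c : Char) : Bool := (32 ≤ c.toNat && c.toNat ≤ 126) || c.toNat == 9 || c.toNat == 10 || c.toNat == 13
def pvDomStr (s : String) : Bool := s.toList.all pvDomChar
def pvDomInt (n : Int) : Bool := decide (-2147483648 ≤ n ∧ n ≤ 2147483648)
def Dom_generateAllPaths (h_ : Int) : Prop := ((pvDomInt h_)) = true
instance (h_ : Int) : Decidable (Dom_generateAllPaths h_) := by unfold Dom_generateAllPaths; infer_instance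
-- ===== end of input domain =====

-- B builds the first path's raw entries by closed-form index formulas (no stateful
-- copy-the-previous-entry loops), rotates each entry to index(min(entry)), and
-- derives path i straight from the first path by one shift of 2*i on the 1..4h
-- circle (the chained +2-mod steps telescope); objective: alternative decomposition.

-- ===== PORT A =====
-- normalizeEntry: entry[0] / entry[i] are in range at every call site (entries are
-- nonempty and i ∈ range(len(entry))); the headD/pyGetD defaults are totality guards only.
def normalizeEntry (entry : List Int) : List Int :=
  let s := (PySem.List.pyRange 0 (entry.length : Int) 1).foldl
    (fun (s : Int × Int) i =>
      if PySem.List.pyGetD entry i 0 < s.1 then (PySem.List.pyGetD entry i 0, i) else s)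
    (entry.headD 0, 0)
  PySem.List.slice entry (some s.2) none ++ PySem.List.slice entry (some 0) (some s.2)

-- generateFirstPath: result[-1] is always nonempty and indices 1/3 are in range
-- (every looped entry has length 4); pyGetD/pySetD defaults are totality guards only.
def generateFirstPath (h_ : Int) : List (List Int) :=
  let first : List Int := [1, 2, 4*h_]
  let seed := first ++ [3]
  let result : List (List Int) := [first, seed]
  let s1 := (PySem.List.pyRange 0 (4*h_ - 4) 1).foldl
    (fun (s : List (List Int) × Int) _t =>
      let newEntry := PySem.List.pyGetD s.1 (-1) []
      let newEntry :=
        if PySem.Int.mod s.2 2 = 0 then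
          PySem.List.pySetD newEntry 1 (PySem.Int.mod (PySem.List.pyGetD newEntry 1 0 + 2) (4*h_))
        else
          PySem.List.pySetD newEntry 3 (PySem.Int.mod (PySem.List.pyGetD newEntry 3 0 + 2) (4*h_))
      (s.1 ++ [newEntry], s.2 + 1))
    (result, 0)
  let result := s1.1
  let mid1 : List Int := [1, 4*h_, 4*h_ - 1]
  let result := result ++ [mid1]
  let mid2 : List Int := [1, 4*h_, 2]
  let result := result ++ [mid2]
  let seed := mid2 ++ [4*h_ - 1]
  let result := result ++ [seed]
  let s2 := (PySem.List.pyRange 0 (4*h_ - 4) 1).foldl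
    (fun (s : List (List Int) × Int) _t =>
      let newEntry := PySem.List.pyGetD s.1 (-1) []
      let newEntry :=
        if PySem.Int.mod s.2 2 = 0 then
          PySem.List.pySetD newEntry 1 (PySem.Int.mod (PySem.List.pyGetD newEntry 1 0 - 2) (4*h_))
        else
          PySem.List.pySetD newEntry 3 (PySem.Int.mod (PySem.List.pyGetD newEntry 3 0 - 2) (4*h_))
      (s.1 ++ [newEntry], s.2 + 1))
    (result, 0)
  let result := s2.1
  let last : List Int := [1, 2, 3]
  let result := result ++ [last]
  result.map normalizeEntry

def step (t : Int) (h_ : Int) (m : Int) : Int :=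
  let result := PySem.Int.mod (t + 2) m
  if result = 0 then 4*h_ else result

def processEntry (entry : List Int) (h_ : Int) (m : Int) : List Int :=
  entry.map (fun t => step t h_ m)

def generateAllPaths (h_ : Int) : List (List (List Int)) :=
  let numPaths := 2*h_
  let modulo := 4*h_
  let firstPath := generateFirstPath h_
  let paths : List (List (List Int)) := [firstPath]
  (PySem.List.pyRange 1 numPaths 1).foldl
    (fun paths i =>
      let prevPath := PySem.List.pyGetD paths (i - 1) []
      let newPath := prevPath.map (fun t => processEntry t h_ modulo)
      paths ++ [newPath.map (fun t => normalizeEntry t)])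
    paths

-- ===== PORT B =====
-- entry.index(min(entry)): min/index raise only on an empty/absent argument —
-- every call site passes a nonempty entry, so the getD defaults are totality guards only.
def normEntryB (entry : List Int) : List Int :=
  let mv := (PySem.List.min? entry (fun x => x)).getD 0
  let j : Nat := (PySem.List.index? entry mv).getD 0
  PySem.List.slice entry (some (j : Int)) none ++ PySem.List.slice entry (some 0) (some (j : Int))

def generateAllPaths_alt (h_ : Int) : List (List (List Int)) :=
  let m := 4*h_
  let raw : List (List Int) :=
    [[1, 2, m], [1, 2, m, 3]]
    ++ (PySem.List.pyRange 1 (m - 3) 1).map (fun k =>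
         [1, 2 + 2 * PySem.Int.floordiv (k + 1) 2, m, 3 + 2 * PySem.Int.floordiv k 2])
    ++ [[1, m, m - 1], [1, m, 2], [1, m, 2, m - 1]]
    ++ (PySem.List.pyRange 1 (m - 3) 1).map (fun k =>
         [1, m - 2 * PySem.Int.floordiv (k + 1) 2, 2, m - 1 - 2 * PySem.Int.floordiv k 2])
    ++ [[1, 2, 3]]
  let first := raw.map normEntryB
  [first] ++ (PySem.List.pyRange 1 (2*h_) 1).map (fun i =>
    first.map (fun e => normEntryB (e.map (fun v => PySem.Int.mod (v - 1 + 2*i) m + 1))))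

-- ===== PRECONDITION & SPEC =====
def Spec_generateAllPaths (h_ : Int) (out : List (List (List Int))) : Prop := out = generateAllPaths_alt h_
instance (h_ : Int) (out : List (List (List Int))) : Decidable (Spec_generateAllPaths h_ out) := by unfold Spec_generateAllPaths; infer_instance

-- ===== CLAIM (what is proved, stated in full; the proofs are below) =====
def Claim_equal_generateAllPaths : Prop := ∀ (h_ : Int), Dom_generateAllPaths h_ → Spec_generateAllPaths h_ (generateAllPaths h_)

-- ===== LEMMAS AND PROOFS =====

-- the entry invariant: nonempty, pairwise-distinct values, all in [1, m]
def entryOK (m : Int) (e : List Int) : Prop :=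
  e ≠ [] ∧ e.Nodup ∧ ∀ v ∈ e, 1 ≤ v ∧ v ≤ m

theorem foldMinFirst (e : List Int) (m : Nat) (hm : m ≤ e.length) (h0 : 0 < e.length) :
    ∃ j' : Nat, j' < e.length ∧
      (List.range m).foldl
        (fun (s : Int × Int) k => if e.getD k 0 < s.1 then (e.getD k 0, (k : Int)) else s)
        (e.getD 0 0, 0) = (e.getD j' 0, (j' : Int)) ∧
      (∀ k : Nat, k < m → e.getD j' 0 ≤ e.getD k 0) ∧
      e.getD j' 0 ≤ e.getD 0 0 ∧
      (∀ k : Nat, k < j' → e.getD j' 0 < e.getD k 0) := by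
  induction m with
  | zero => exact ⟨0, h0, by norm_num, by omega, le_refl _, by omega⟩
  | succ m ih =>
    obtain ⟨j', hj', heq, hmin, h0le, hfirst⟩ := ih (by omega)
    rw [List.range_succ, List.foldl_append, heq]
    simp only [List.foldl_cons, List.foldl_nil]
    by_cases hlt : e.getD m 0 < e.getD j' 0
    · refine ⟨m, by omega, by rw [if_pos hlt], ?_, le_trans (le_of_lt hlt) h0le, ?_⟩
      · intro k hk
        rcases Nat.lt_or_ge k m with hk' | hk'
        · exact le_trans (le_of_lt hlt) (hmin k hk')
        · have : k = m := by omega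
          simp [this]
      · intro k hk
        exact lt_of_lt_of_le hlt (hmin k hk)
    · refine ⟨j', hj', by rw [if_neg hlt], ?_, h0le, hfirst⟩
      intro k hk
      rcases Nat.lt_or_ge k m with hk' | hk'
      · exact hmin k hk'
      · have : k = m := by omega
        rw [this]; exact le_of_not_gt hlt

-- A's normalizeEntry rotates to the FIRST index attaining the minimum
theorem normalizeEntry_char (e : List Int) (he : e ≠ []) :
    ∃ j : Nat, j < e.length ∧ normalizeEntry e = e.drop j ++ e.take j ∧
      (∀ k : Nat, k < e.length → e.getD j 0 ≤ e.getD k 0) ∧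
      (∀ k : Nat, k < j → e.getD j 0 < e.getD k 0) := by
  obtain ⟨j', hj', heq, hmin, _, hfirst⟩ := foldMinFirst e e.length le_rfl (List.length_pos_iff.mpr he)
  refine ⟨j', hj', ?_, hmin, hfirst⟩
  unfold normalizeEntry
  rw [PySem.List.pyRange_zero_natCast, List.foldl_map]
  simp only [PySem.List.pyGetD_natCast]
  have hhead : e.headD 0 = e.getD 0 0 := by cases e <;> simp
  rw [hhead]
  rw [heq]
  rw [PySem.List.slice_from_natCast, PySem.List.slice_zero_start, PySem.List.slice_to_natCast]

theorem normalizeEntry_eq_rotate (e : List Int) (he : e ≠ []) :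
    ∃ j : Nat, j < e.length ∧ normalizeEntry e = e.rotate j ∧
      ∀ k : Nat, k < e.length → e.getD j 0 ≤ e.getD k 0 := by
  obtain ⟨j, hj, heq, hmin, _⟩ := normalizeEntry_char e he
  exact ⟨j, hj, by rw [heq, List.rotate_eq_drop_append_take (le_of_lt hj)], hmin⟩

-- B's normalize agrees with A's on every nonempty entry
theorem normEntryB_eq (e : List Int) (he : e ≠ []) : normEntryB e = normalizeEntry e := by
  obtain ⟨j, hj, heq, hmin, hfirst⟩ := normalizeEntry_char e he
  obtain ⟨v, hv⟩ : ∃ v, PySem.List.min? e (fun x => x) = some v := by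
    cases hmv : PySem.List.min? e (fun x => x) with
    | none => exact absurd ((PySem.List.min?_eq_none_iff e (fun x => x)).mp hmv) he
    | some v => exact ⟨v, rfl⟩
  have hvmem : v ∈ e := PySem.List.min?_mem hv
  have hvmin : ∀ y ∈ e, v ≤ y := PySem.List.min?_isMin hv
  have hveq : v = e.getD j 0 := by
    have h1 : v ≤ e.getD j 0 := by
      refine hvmin _ ?_
      rw [List.getD_eq_getElem _ _ hj]
      exact List.getElem_mem _
    have h2 : e.getD j 0 ≤ v := by
      obtain ⟨t, ht, hteq⟩ := List.mem_iff_getElem.mp hvmem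
      rw [← hteq, ← List.getD_eq_getElem e 0 ht]
      exact hmin t ht
    omega
  have hidx : PySem.List.index? e v = some j := by
    rw [PySem.List.index?_eq_some_iff]
    refine ⟨e.take j, e.drop (j + 1), ?_, by rw [List.length_take]; omega, ?_⟩
    · conv_lhs => rw [← List.take_append_drop j e]
      rw [List.drop_eq_getElem_cons hj]
      rw [hveq, List.getD_eq_getElem _ _ hj]
    · intro hmem
      obtain ⟨t, ht, hteq⟩ := List.mem_iff_getElem.mp hmem
      have htj : t < j := by
        have := List.length_take_le j e
        omega
      rw [List.getElem_take] at hteq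
      have hlt := hfirst t htj
      rw [← hveq] at hlt
      rw [← List.getD_eq_getElem e 0 (by omega : t < e.length)] at hteq
      omega
  simp only [normEntryB, hv, hidx, Option.getD_some]
  rw [PySem.List.slice_from_natCast, PySem.List.slice_zero_start, PySem.List.slice_to_natCast, heq]

theorem normalizeEntry_rotate (y : List Int) (hy : y ≠ []) (hnd : y.Nodup) (k : Nat) :
    normalizeEntry (y.rotate k) = normalizeEntry y := by
  have hn : 0 < y.length := List.length_pos_iff.mpr hy
  have hrlen : (y.rotate k).length = y.length := List.length_rotate y k
  have hr : y.rotate k ≠ [] := by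
    intro h; rw [h] at hrlen; simp at hrlen; omega
  obtain ⟨i, hi, hri, hminr⟩ := normalizeEntry_eq_rotate (y.rotate k) hr
  obtain ⟨j, hj, hyj, hminy⟩ := normalizeEntry_eq_rotate y hy
  rw [hri, hyj, List.rotate_rotate]
  have hi' : i < y.length := by omega
  have hperm := List.rotate_perm y k
  have hgetr : (y.rotate k).getD i 0 = y.getD ((i + k) % y.length) 0 := by
    rw [List.getD_eq_getElem _ _ (by omega), List.getD_eq_getElem _ _ (Nat.mod_lt _ hn)]
    exact List.getElem_rotate y k i (by omega)
  have hval : y.getD ((i + k) % y.length) 0 = y.getD j 0 := by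
    have h1 : y.getD j 0 ≤ (y.rotate k).getD i 0 := by
      have hmem : (y.rotate k).getD i 0 ∈ y := by
        refine hperm.mem_iff.mp ?_
        rw [List.getD_eq_getElem _ _ (by omega)]
        exact List.getElem_mem _
      obtain ⟨t, ht, hteq⟩ := List.mem_iff_getElem.mp hmem
      rw [← hteq, ← List.getD_eq_getElem y 0 ht]
      exact hminy t ht
    have h2 : (y.rotate k).getD i 0 ≤ y.getD j 0 := by
      have hmem : y.getD j 0 ∈ y.rotate k := by
        refine hperm.symm.mem_iff.mp ?_
        rw [List.getD_eq_getElem _ _ hj]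
        exact List.getElem_mem _
      obtain ⟨t, ht, hteq⟩ := List.mem_iff_getElem.mp hmem
      rw [← hteq, ← List.getD_eq_getElem (y.rotate k) 0 ht]
      exact hminr t (by omega)
    rw [← hgetr]
    exact le_antisymm h2 h1
  have hidx : (i + k) % y.length = j := by
    have hmlt : (i + k) % y.length < y.length := Nat.mod_lt _ hn
    have := hnd.getElem_inj_iff (hi := hmlt) (hj := hj)
    apply this.mp
    rw [← List.getD_eq_getElem _ 0, ← List.getD_eq_getElem _ 0]
    exact hval
  calc y.rotate (k + i) = y.rotate ((k + i) % y.length) := (List.rotate_mod y (k+i)).symm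
    _ = y.rotate j := by rw [Nat.add_comm k i, hidx]

theorem entryOK_normalizeEntry {m : Int} {e : List Int} (h : entryOK m e) :
    entryOK m (normalizeEntry e) := by
  obtain ⟨j, hj, heq, _⟩ := normalizeEntry_eq_rotate e h.1
  rw [heq]
  refine ⟨?_, List.nodup_rotate.mpr h.2.1, fun v hv => h.2.2 v ((List.rotate_perm e j).subset hv)⟩
  intro hc
  have := List.length_rotate e j
  rw [hc] at this
  simp at this
  exact h.1 (List.length_eq_zero_iff.mp this.symm)

theorem shift_mem_bounds {m : Int} (hm : 0 < m) (x : Int) :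
    1 ≤ PySem.Int.mod x m + 1 ∧ PySem.Int.mod x m + 1 ≤ m := by
  rw [PySem.Int.mod_eq_emod_of_pos hm]
  have h1 := Int.emod_nonneg x (by omega : m ≠ 0)
  have h2 := Int.emod_lt_of_pos x hm
  omega

theorem shift_inj {m : Int} (hm : 0 < m) {v w d : Int}
    (hv1 : 1 ≤ v) (hv2 : v ≤ m) (hw1 : 1 ≤ w) (hw2 : w ≤ m)
    (h : PySem.Int.mod (v - 1 + d) m + 1 = PySem.Int.mod (w - 1 + d) m + 1) : v = w := by
  rw [PySem.Int.mod_eq_emod_of_pos hm, PySem.Int.mod_eq_emod_of_pos hm] at h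
  have h' : (v - 1 + d) % m = (w - 1 + d) % m := by omega
  have h0 : (v - 1 + d - (w - 1 + d)) % m = 0 := Int.emod_eq_emod_iff_emod_sub_eq_zero.mp h'
  have h0' : (v - w) % m = 0 := by rw [show v - 1 + d - (w - 1 + d) = v - w by ring] at h0; exact h0
  have hd : m ∣ (v - w) := Int.dvd_of_emod_eq_zero h0'
  have := Int.eq_zero_of_abs_lt_dvd hd (by rw [abs_lt]; omega)
  omega

theorem entryOK_shift {m : Int} (hm : 0 < m) {e : List Int} (h : entryOK m e) (d : Int) :
    entryOK m (e.map (fun v => PySem.Int.mod (v - 1 + d) m + 1)) := by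
  refine ⟨fun hc => h.1 (List.map_eq_nil_iff.mp hc), ?_, ?_⟩
  · refine List.Nodup.map_on ?_ h.2.1
    intro x hx y hy hfeq
    exact shift_inj hm (h.2.2 x hx).1 (h.2.2 x hx).2 (h.2.2 y hy).1 (h.2.2 y hy).2 hfeq
  · intro v hv
    obtain ⟨w, _, hw⟩ := List.mem_map.mp hv
    rw [← hw]
    exact shift_mem_bounds hm _

theorem step_eq_shift (h_ : Int) (hh : 1 ≤ h_) (w : Int) (hw1 : 1 ≤ w) (hw2 : w ≤ 4*h_) :
    step w h_ (4*h_) = PySem.Int.mod (w - 1 + 2) (4*h_) + 1 := by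
  have hm : (0:Int) < 4*h_ := by omega
  simp only [step]
  rw [PySem.Int.mod_eq_emod_of_pos hm, PySem.Int.mod_eq_emod_of_pos hm]
  rw [show w - 1 + 2 = w + 1 by ring]
  by_cases hc : w + 2 ≤ 4*h_
  · have hs : (w+1) % (4*h_) = w+1 := Int.emod_eq_of_lt (by omega) (by omega)
    by_cases he : w + 2 = 4*h_
    · have h0 : (w+2) % (4*h_) = 0 := by rw [he]; exact Int.emod_self
      rw [h0, if_pos rfl, hs]; omega
    · have h0 : (w+2) % (4*h_) = w+2 := Int.emod_eq_of_lt (by omega) (by omega)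
      rw [h0, hs, if_neg (by omega)]; ring
  · have h0 : (w+2) % (4*h_) = w+2-4*h_ := by
      rw [← Int.sub_emod_right (w+2) (4*h_)]
      exact Int.emod_eq_of_lt (by omega) (by omega)
    have hs : (w+1) % (4*h_) = w+1-4*h_ := by
      rw [← Int.sub_emod_right (w+1) (4*h_)]
      exact Int.emod_eq_of_lt (by omega) (by omega)
    rw [h0, hs, if_neg (by omega)]
    omega

theorem chain_step (h_ : Int) (hh : 1 ≤ h_) (e : List Int) (hQ : entryOK (4*h_) e) (d : Int) :
    normalizeEntry ((normalizeEntry (e.map (fun v => PySem.Int.mod (v - 1 + d) (4*h_) + 1))).map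
        (fun t => step t h_ (4*h_))) =
      normalizeEntry (e.map (fun v => PySem.Int.mod (v - 1 + (d + 2)) (4*h_) + 1)) := by
  have hm : (0:Int) < 4*h_ := by omega
  have hz := entryOK_shift hm hQ d
  obtain ⟨j, hj, hzeq, _⟩ := normalizeEntry_eq_rotate _ hz.1
  rw [hzeq, List.map_rotate]
  have hms : (e.map (fun v => PySem.Int.mod (v - 1 + d) (4*h_) + 1)).map (fun t => step t h_ (4*h_))
      = e.map (fun v => PySem.Int.mod (v - 1 + (d + 2)) (4*h_) + 1) := by
    rw [List.map_map]
    refine List.map_congr_left ?_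
    intro v hv
    have hb := (hQ.2.2 v hv)
    have hw := shift_mem_bounds hm (v - 1 + d)
    simp only [Function.comp]
    rw [step_eq_shift h_ hh _ hw.1 hw.2]
    rw [PySem.Int.mod_eq_emod_of_pos hm, PySem.Int.mod_eq_emod_of_pos hm, PySem.Int.mod_eq_emod_of_pos hm]
    rw [show (v - 1 + d) % (4*h_) + 1 - 1 + 2 = (v - 1 + d) % (4*h_) + 2 by ring]
    rw [Int.emod_add_emod]
    rw [show v - 1 + d + 2 = v - 1 + (d + 2) by ring]
  rw [hms]
  have hz2 := entryOK_shift hm hQ (d + 2)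
  exact normalizeEntry_rotate _ hz2.1 hz2.2.1 j

theorem normalizeEntry_idem {m : Int} {e : List Int} (h : entryOK m e) :
    normalizeEntry (normalizeEntry e) = normalizeEntry e := by
  obtain ⟨j, _, heq, _⟩ := normalizeEntry_eq_rotate e h.1
  calc normalizeEntry (normalizeEntry e) = normalizeEntry (e.rotate j) := by rw [heq]
    _ = normalizeEntry e := normalizeEntry_rotate e h.1 h.2.1 j

def E1 (h_ : Int) (k : Nat) : List Int :=
  [1, 2 + 2*((((k+1)/2 : Nat)) : Int), 4*h_, 3 + 2*(((k/2 : Nat)) : Int)]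

theorem E1_OK (h_ : Int) (hh : 1 ≤ h_) (k : Nat) (hk : (k:Int) ≤ 4*h_ - 4) :
    entryOK (4*h_) (E1 h_ k) := by
  refine ⟨by simp [E1], ?_, ?_⟩
  · simp only [E1, List.nodup_cons, List.mem_cons, List.not_mem_nil,
      List.nodup_nil, and_true, not_or, not_false_iff]
    omega
  · intro v hv
    simp only [E1, List.mem_cons, List.not_mem_nil, or_false] at hv
    rcases hv with rfl | rfl | rfl | rfl <;> omega

def E2 (h_ : Int) (k : Nat) : List Int :=
  [1, 4*h_ - 2*((((k+1)/2 : Nat)) : Int), 2, 4*h_ - 1 - 2*(((k/2 : Nat)) : Int)]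

theorem E2_OK (h_ : Int) (hh : 1 ≤ h_) (k : Nat) (hk : (k:Int) ≤ 4*h_ - 4) :
    entryOK (4*h_) (E2 h_ k) := by
  refine ⟨by simp [E2], ?_, ?_⟩
  · simp only [E2, List.nodup_cons, List.mem_cons, List.not_mem_nil,
      List.nodup_nil, and_true, not_or, not_false_iff]
    omega
  · intro v hv
    simp only [E2, List.mem_cons, List.not_mem_nil, or_false] at hv
    rcases hv with rfl | rfl | rfl | rfl <;> omega

-- full-list characterization of A's first (+2) loop
theorem loop1_list (h_ : Int) (rs0 : List (List Int))
    (hlast0 : rs0.getLast? = some (E1 h_ 0)) :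
    ∀ n : Nat, n ≤ (4*h_ - 4).toNat →
      ((PySem.List.pyRange 0 (n:Int) 1).foldl
        (fun (s : List (List Int) × Int) _t =>
          let newEntry := PySem.List.pyGetD s.1 (-1) []
          let newEntry :=
            if PySem.Int.mod s.2 2 = 0 then
              PySem.List.pySetD newEntry 1 (PySem.Int.mod (PySem.List.pyGetD newEntry 1 0 + 2) (4*h_))
            else
              PySem.List.pySetD newEntry 3 (PySem.Int.mod (PySem.List.pyGetD newEntry 3 0 + 2) (4*h_))
          (s.1 ++ [newEntry], s.2 + 1)) (rs0, 0)).1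
        = rs0 ++ (List.range n).map (fun k => E1 h_ (k+1)) ∧
      ((PySem.List.pyRange 0 (n:Int) 1).foldl
        (fun (s : List (List Int) × Int) _t =>
          let newEntry := PySem.List.pyGetD s.1 (-1) []
          let newEntry :=
            if PySem.Int.mod s.2 2 = 0 then
              PySem.List.pySetD newEntry 1 (PySem.Int.mod (PySem.List.pyGetD newEntry 1 0 + 2) (4*h_))
            else
              PySem.List.pySetD newEntry 3 (PySem.Int.mod (PySem.List.pyGetD newEntry 3 0 + 2) (4*h_))
          (s.1 ++ [newEntry], s.2 + 1)) (rs0, 0)).2 = (n:Int) := by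
  intro n
  induction n with
  | zero =>
    intro _
    rw [show ((0:Nat):Int) = (0:Int) from rfl, PySem.List.pyRange_one_eq_nil le_rfl]
    simp
  | succ n ih =>
    intro hn
    obtain ⟨ihl, ihc⟩ := ih (by omega)
    have hn' : (n:Int) + 1 ≤ 4*h_ - 4 := by omega
    have hsplit : PySem.List.pyRange 0 ((n+1 : Nat):Int) 1 = PySem.List.pyRange 0 (n:Int) 1 ++ [(n:Int)] := by
      push_cast
      exact PySem.List.pyRange_one_succ_right (by positivity)
    rw [hsplit, List.foldl_append]
    set st := (PySem.List.pyRange 0 (n:Int) 1).foldl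
        (fun (s : List (List Int) × Int) _t =>
          let newEntry := PySem.List.pyGetD s.1 (-1) []
          let newEntry :=
            if PySem.Int.mod s.2 2 = 0 then
              PySem.List.pySetD newEntry 1 (PySem.Int.mod (PySem.List.pyGetD newEntry 1 0 + 2) (4*h_))
            else
              PySem.List.pySetD newEntry 3 (PySem.Int.mod (PySem.List.pyGetD newEntry 3 0 + 2) (4*h_))
          (s.1 ++ [newEntry], s.2 + 1)) (rs0, 0) with hst
    simp only [List.foldl_cons, List.foldl_nil]
    have ihlast : st.1.getLast? = some (E1 h_ n) := by
      rw [ihl]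
      cases n with
      | zero => simpa using hlast0
      | succ n' =>
        rw [List.range_succ, List.map_append, ← List.append_assoc]
        exact List.getLast?_concat
    have hne : st.1 ≠ [] := by
      intro hc; rw [hc] at ihlast; simp at ihlast
    have hgetlast : PySem.List.pyGetD st.1 (-1) [] = E1 h_ n := by
      rw [PySem.List.pyGetD_neg_one st.1 [] hne]
      rw [List.getLast?_eq_some_getLast hne] at ihlast
      exact Option.some.inj ihlast
    rw [hgetlast, ihc]
    have hmod2 : PySem.Int.mod ((n:Int)) 2 = ((n % 2 : Nat) : Int) := by
      rw [PySem.Int.mod_eq_emod_of_pos (by omega)]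
      push_cast
      omega
    rcases Nat.even_or_odd n with he | ho
    · have hpar : PySem.Int.mod ((n:Int)) 2 = 0 := by rw [hmod2]; obtain ⟨r, hr⟩ := he; omega
      rw [if_pos hpar]
      have hget1 : PySem.List.pyGetD (E1 h_ n) 1 0 = 2 + 2*((((n+1)/2 : Nat)) : Int) := by
        rw [PySem.List.pyGetD_of_nonneg _ _ (by omega : (0:Int) ≤ 1)]
        rfl
      rw [hget1]
      have hval : PySem.Int.mod (2 + 2*((((n+1)/2 : Nat)) : Int) + 2) (4*h_)
          = 2 + 2*((((n+2)/2 : Nat)) : Int) := by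
        rw [PySem.Int.mod_eq_emod_of_pos (by omega)]
        rw [Int.emod_eq_of_lt (by omega) (by obtain ⟨r, hr⟩ := he; omega)]
        obtain ⟨r, hr⟩ := he; omega
      rw [hval]
      have hset : PySem.List.pySetD (E1 h_ n) 1 (2 + 2*((((n+2)/2 : Nat)) : Int)) = E1 h_ (n+1) := by
        rw [PySem.List.pySetD_of_nonneg _ _ (by omega : (0:Int) ≤ 1)]
        obtain ⟨r, hr⟩ := he
        simp only [E1, Int.toNat_one, List.set, List.cons.injEq, and_true, true_and]
        omega
      rw [hset]
      refine ⟨?_, by push_cast; ring⟩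
      rw [ihl, List.range_succ, List.map_append, List.append_assoc]
      rfl
    · have hpar : PySem.Int.mod ((n:Int)) 2 ≠ 0 := by rw [hmod2]; obtain ⟨r, hr⟩ := ho; omega
      rw [if_neg hpar]
      have hget3 : PySem.List.pyGetD (E1 h_ n) 3 0 = 3 + 2*(((n/2 : Nat)) : Int) := by
        rw [PySem.List.pyGetD_of_nonneg _ _ (by omega : (0:Int) ≤ 3)]
        rfl
      rw [hget3]
      have hval : PySem.Int.mod (3 + 2*(((n/2 : Nat)) : Int) + 2) (4*h_)
          = 3 + 2*((((n+1)/2 : Nat)) : Int) := by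
        rw [PySem.Int.mod_eq_emod_of_pos (by omega)]
        rw [Int.emod_eq_of_lt (by omega) (by obtain ⟨r, hr⟩ := ho; omega)]
        obtain ⟨r, hr⟩ := ho; omega
      rw [hval]
      have hset : PySem.List.pySetD (E1 h_ n) 3 (3 + 2*((((n+1)/2 : Nat)) : Int)) = E1 h_ (n+1) := by
        rw [PySem.List.pySetD_of_nonneg _ _ (by omega : (0:Int) ≤ 3)]
        obtain ⟨r, hr⟩ := ho
        simp only [E1, show (3:Int).toNat = 3 from rfl, List.set, List.cons.injEq, and_true, true_and]
        omega
      rw [hset]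
      refine ⟨?_, by push_cast; ring⟩
      rw [ihl, List.range_succ, List.map_append, List.append_assoc]
      rfl

-- full-list characterization of A's second (-2) loop
theorem loop2_list (h_ : Int) (rs0 : List (List Int))
    (hlast0 : rs0.getLast? = some (E2 h_ 0)) :
    ∀ n : Nat, n ≤ (4*h_ - 4).toNat →
      ((PySem.List.pyRange 0 (n:Int) 1).foldl
        (fun (s : List (List Int) × Int) _t =>
          let newEntry := PySem.List.pyGetD s.1 (-1) []
          let newEntry :=
            if PySem.Int.mod s.2 2 = 0 then
              PySem.List.pySetD newEntry 1 (PySem.Int.mod (PySem.List.pyGetD newEntry 1 0 - 2) (4*h_))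
            else
              PySem.List.pySetD newEntry 3 (PySem.Int.mod (PySem.List.pyGetD newEntry 3 0 - 2) (4*h_))
          (s.1 ++ [newEntry], s.2 + 1)) (rs0, 0)).1
        = rs0 ++ (List.range n).map (fun k => E2 h_ (k+1)) ∧
      ((PySem.List.pyRange 0 (n:Int) 1).foldl
        (fun (s : List (List Int) × Int) _t =>
          let newEntry := PySem.List.pyGetD s.1 (-1) []
          let newEntry :=
            if PySem.Int.mod s.2 2 = 0 then
              PySem.List.pySetD newEntry 1 (PySem.Int.mod (PySem.List.pyGetD newEntry 1 0 - 2) (4*h_))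
            else
              PySem.List.pySetD newEntry 3 (PySem.Int.mod (PySem.List.pyGetD newEntry 3 0 - 2) (4*h_))
          (s.1 ++ [newEntry], s.2 + 1)) (rs0, 0)).2 = (n:Int) := by
  intro n
  induction n with
  | zero =>
    intro _
    rw [show ((0:Nat):Int) = (0:Int) from rfl, PySem.List.pyRange_one_eq_nil le_rfl]
    simp
  | succ n ih =>
    intro hn
    obtain ⟨ihl, ihc⟩ := ih (by omega)
    have hn' : (n:Int) + 1 ≤ 4*h_ - 4 := by omega
    have hsplit : PySem.List.pyRange 0 ((n+1 : Nat):Int) 1 = PySem.List.pyRange 0 (n:Int) 1 ++ [(n:Int)] := by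
      push_cast
      exact PySem.List.pyRange_one_succ_right (by positivity)
    rw [hsplit, List.foldl_append]
    set st := (PySem.List.pyRange 0 (n:Int) 1).foldl
        (fun (s : List (List Int) × Int) _t =>
          let newEntry := PySem.List.pyGetD s.1 (-1) []
          let newEntry :=
            if PySem.Int.mod s.2 2 = 0 then
              PySem.List.pySetD newEntry 1 (PySem.Int.mod (PySem.List.pyGetD newEntry 1 0 - 2) (4*h_))
            else
              PySem.List.pySetD newEntry 3 (PySem.Int.mod (PySem.List.pyGetD newEntry 3 0 - 2) (4*h_))
          (s.1 ++ [newEntry], s.2 + 1)) (rs0, 0) with hst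
    simp only [List.foldl_cons, List.foldl_nil]
    have ihlast : st.1.getLast? = some (E2 h_ n) := by
      rw [ihl]
      cases n with
      | zero => simpa using hlast0
      | succ n' =>
        rw [List.range_succ, List.map_append, ← List.append_assoc]
        exact List.getLast?_concat
    have hne : st.1 ≠ [] := by
      intro hc; rw [hc] at ihlast; simp at ihlast
    have hgetlast : PySem.List.pyGetD st.1 (-1) [] = E2 h_ n := by
      rw [PySem.List.pyGetD_neg_one st.1 [] hne]
      rw [List.getLast?_eq_some_getLast hne] at ihlast
      exact Option.some.inj ihlast
    rw [hgetlast, ihc]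
    have hmod2 : PySem.Int.mod ((n:Int)) 2 = ((n % 2 : Nat) : Int) := by
      rw [PySem.Int.mod_eq_emod_of_pos (by omega)]
      push_cast
      omega
    rcases Nat.even_or_odd n with he | ho
    · have hpar : PySem.Int.mod ((n:Int)) 2 = 0 := by rw [hmod2]; obtain ⟨r, hr⟩ := he; omega
      rw [if_pos hpar]
      have hget1 : PySem.List.pyGetD (E2 h_ n) 1 0 = 4*h_ - 2*((((n+1)/2 : Nat)) : Int) := by
        rw [PySem.List.pyGetD_of_nonneg _ _ (by omega : (0:Int) ≤ 1)]
        rfl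
      rw [hget1]
      have hval : PySem.Int.mod (4*h_ - 2*((((n+1)/2 : Nat)) : Int) - 2) (4*h_)
          = 4*h_ - 2*((((n+2)/2 : Nat)) : Int) := by
        rw [PySem.Int.mod_eq_emod_of_pos (by omega)]
        rw [Int.emod_eq_of_lt (by obtain ⟨r, hr⟩ := he; omega) (by obtain ⟨r, hr⟩ := he; omega)]
        obtain ⟨r, hr⟩ := he; omega
      rw [hval]
      have hset : PySem.List.pySetD (E2 h_ n) 1 (4*h_ - 2*((((n+2)/2 : Nat)) : Int)) = E2 h_ (n+1) := by
        rw [PySem.List.pySetD_of_nonneg _ _ (by omega : (0:Int) ≤ 1)]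
        obtain ⟨r, hr⟩ := he
        simp only [E2, Int.toNat_one, List.set, List.cons.injEq, and_true, true_and]
        omega
      rw [hset]
      refine ⟨?_, by push_cast; ring⟩
      rw [ihl, List.range_succ, List.map_append, List.append_assoc]
      rfl
    · have hpar : PySem.Int.mod ((n:Int)) 2 ≠ 0 := by rw [hmod2]; obtain ⟨r, hr⟩ := ho; omega
      rw [if_neg hpar]
      have hget3 : PySem.List.pyGetD (E2 h_ n) 3 0 = 4*h_ - 1 - 2*(((n/2 : Nat)) : Int) := by
        rw [PySem.List.pyGetD_of_nonneg _ _ (by omega : (0:Int) ≤ 3)]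
        rfl
      rw [hget3]
      have hval : PySem.Int.mod (4*h_ - 1 - 2*(((n/2 : Nat)) : Int) - 2) (4*h_)
          = 4*h_ - 1 - 2*((((n+1)/2 : Nat)) : Int) := by
        rw [PySem.Int.mod_eq_emod_of_pos (by omega)]
        rw [Int.emod_eq_of_lt (by obtain ⟨r, hr⟩ := ho; omega) (by obtain ⟨r, hr⟩ := ho; omega)]
        obtain ⟨r, hr⟩ := ho; omega
      rw [hval]
      have hset : PySem.List.pySetD (E2 h_ n) 3 (4*h_ - 1 - 2*((((n+1)/2 : Nat)) : Int)) = E2 h_ (n+1) := by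
        rw [PySem.List.pySetD_of_nonneg _ _ (by omega : (0:Int) ≤ 3)]
        obtain ⟨r, hr⟩ := ho
        simp only [E2, show (3:Int).toNat = 3 from rfl, List.set, List.cons.injEq, and_true, true_and]
        omega
      rw [hset]
      refine ⟨?_, by push_cast; ring⟩
      rw [ihl, List.range_succ, List.map_append, List.append_assoc]
      rfl

-- the raw (un-normalized) entry list A's generateFirstPath builds
def rawA (h_ : Int) : List (List Int) :=
  [[1, 2, 4*h_], [1, 2, 4*h_, 3]]
  ++ (List.range (4*h_ - 4).toNat).map (fun k => E1 h_ (k+1))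
  ++ [[1, 4*h_, 4*h_ - 1], [1, 4*h_, 2], [1, 4*h_, 2, 4*h_ - 1]]
  ++ (List.range (4*h_ - 4).toNat).map (fun k => E2 h_ (k+1))
  ++ [[1, 2, 3]]

theorem gFP_eq (h_ : Int) : generateFirstPath h_ = (rawA h_).map normalizeEntry := by
  have hr : PySem.List.pyRange 0 (4*h_ - 4) 1
      = PySem.List.pyRange 0 (((4*h_ - 4).toNat : Nat) : Int) 1 := by
    by_cases hc : 0 ≤ 4*h_ - 4
    · rw [Int.toNat_of_nonneg hc]
    · rw [PySem.List.pyRange_one_eq_nil (by omega), PySem.List.pyRange_one_eq_nil (by omega)]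
  simp only [generateFirstPath]
  rw [hr]
  obtain ⟨hl1, _⟩ := loop1_list h_ [[1, 2, 4*h_], [1, 2, 4*h_] ++ [3]]
    (by norm_num [E1]) (4*h_ - 4).toNat le_rfl
  rw [hl1]
  obtain ⟨hl2, _⟩ := loop2_list h_
    ((([[1, 2, 4*h_], [1, 2, 4*h_] ++ [3]]
        ++ (List.range (4*h_ - 4).toNat).map (fun k => E1 h_ (k+1)))
        ++ [[1, 4*h_, 4*h_ - 1]] ++ [[1, 4*h_, 2]]) ++ [[1, 4*h_, 2] ++ [4*h_ - 1]])
    (by rw [List.getLast?_concat]; norm_num [E2]) (4*h_ - 4).toNat le_rfl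
  rw [hl2]
  congr 1
  simp only [rawA, List.cons_append, List.nil_append, List.append_assoc]

theorem rawA_ne (h_ : Int) : ∀ e ∈ rawA h_, e ≠ [] := by
  intro e he
  simp only [rawA, List.append_assoc, List.mem_append, List.mem_cons,
    List.not_mem_nil, or_false, List.mem_map] at he
  rcases he with (rfl | rfl) | ⟨k, _, rfl⟩ | (rfl | rfl | rfl) | ⟨k, _, rfl⟩ | rfl <;>
    simp [E1, E2]

theorem rawA_OK (h_ : Int) (hh : 1 ≤ h_) : ∀ e ∈ rawA h_, entryOK (4*h_) e := by
  intro e he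
  simp only [rawA, List.append_assoc, List.mem_append, List.mem_cons,
    List.not_mem_nil, or_false, List.mem_map] at he
  have hlit : ∀ l : List Int, l ≠ [] → l.Nodup → (∀ v ∈ l, 1 ≤ v ∧ v ≤ 4*h_) → entryOK (4*h_) l :=
    fun l a b c => ⟨a, b, c⟩
  rcases he with (rfl | rfl) | ⟨k, hk, rfl⟩ | (rfl | rfl | rfl) | ⟨k, hk, rfl⟩ | rfl
  · refine hlit _ (by simp) ?_ ?_
    · simp only [List.nodup_cons, List.mem_cons, List.not_mem_nil,
        List.nodup_nil, and_true, not_or, not_false_iff]; omega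
    · intro v hv
      simp only [List.mem_cons, List.not_mem_nil, or_false] at hv
      rcases hv with rfl | rfl | rfl <;> omega
  · refine hlit _ (by simp) ?_ ?_
    · simp only [List.nodup_cons, List.mem_cons, List.not_mem_nil,
        List.nodup_nil, and_true, not_or, not_false_iff]; omega
    · intro v hv
      simp only [List.mem_cons, List.not_mem_nil, or_false] at hv
      rcases hv with rfl | rfl | rfl | rfl <;> omega
  · exact E1_OK h_ hh (k+1) (by rw [List.mem_range] at hk; omega)
  · refine hlit _ (by simp) ?_ ?_
    · simp only [List.nodup_cons, List.mem_cons, List.not_mem_nil,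
        List.nodup_nil, and_true, not_or, not_false_iff]; omega
    · intro v hv
      simp only [List.mem_cons, List.not_mem_nil, or_false] at hv
      rcases hv with rfl | rfl | rfl <;> omega
  · refine hlit _ (by simp) ?_ ?_
    · simp only [List.nodup_cons, List.mem_cons, List.not_mem_nil,
        List.nodup_nil, and_true, not_or, not_false_iff]; omega
    · intro v hv
      simp only [List.mem_cons, List.not_mem_nil, or_false] at hv
      rcases hv with rfl | rfl | rfl <;> omega
  · refine hlit _ (by simp) ?_ ?_
    · simp only [List.nodup_cons, List.mem_cons, List.not_mem_nil,
        List.nodup_nil, and_true, not_or, not_false_iff]; omega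
    · intro v hv
      simp only [List.mem_cons, List.not_mem_nil, or_false] at hv
      rcases hv with rfl | rfl | rfl | rfl <;> omega
  · exact E2_OK h_ hh (k+1) (by rw [List.mem_range] at hk; omega)
  · refine hlit _ (by simp) ?_ ?_
    · simp only [List.nodup_cons, List.mem_cons, List.not_mem_nil,
        List.nodup_nil, and_true, not_or, not_false_iff]; omega
    · intro v hv
      simp only [List.mem_cons, List.not_mem_nil, or_false] at hv
      rcases hv with rfl | rfl | rfl <;> omega

theorem generateFirstPath_OK (h_ : Int) (hh : 1 ≤ h_) :
    ∀ e ∈ generateFirstPath h_, entryOK (4*h_) e ∧ normalizeEntry e = e := by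
  intro e he
  rw [gFP_eq] at he
  obtain ⟨raw, hraw, rfl⟩ := List.mem_map.mp he
  have hQ := rawA_OK h_ hh raw hraw
  exact ⟨entryOK_normalizeEntry hQ, normalizeEntry_idem hQ⟩

-- B's raw comprehension equals A's raw list
theorem rawB_eq (h_ : Int) :
    ([[1, 2, 4*h_], [1, 2, 4*h_, 3]]
    ++ (PySem.List.pyRange 1 (4*h_ - 3) 1).map (fun k =>
         [1, 2 + 2 * PySem.Int.floordiv (k + 1) 2, 4*h_, 3 + 2 * PySem.Int.floordiv k 2])
    ++ [[1, 4*h_, 4*h_ - 1], [1, 4*h_, 2], [1, 4*h_, 2, 4*h_ - 1]]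
    ++ (PySem.List.pyRange 1 (4*h_ - 3) 1).map (fun k =>
         [1, 4*h_ - 2 * PySem.Int.floordiv (k + 1) 2, 2, 4*h_ - 1 - 2 * PySem.Int.floordiv k 2])
    ++ [[1, 2, 3]]) = rawA h_ := by
  have hlist : ∀ (a1 b1 a2 b2 a3 b3 a4 b4 : Int), a1 = b1 → a2 = b2 → a3 = b3 → a4 = b4 →
      ([a1, a2, a3, a4] : List Int) = [b1, b2, b3, b4] := by
    intros; subst_vars; rfl
  have hN : (4*h_ - 3 - 1 : Int).toNat = (4*h_ - 4).toNat := by omega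
  have m1 : (PySem.List.pyRange 1 (4*h_ - 3) 1).map (fun k =>
        [1, 2 + 2 * PySem.Int.floordiv (k + 1) 2, 4*h_, 3 + 2 * PySem.Int.floordiv k 2])
      = (List.range (4*h_ - 4).toNat).map (fun k => E1 h_ (k+1)) := by
    rw [PySem.List.pyRange_one, hN, List.map_map]
    refine List.map_congr_left ?_
    intro k _
    simp only [Function.comp]
    rw [PySem.Int.floordiv_eq_ediv_of_pos (by norm_num : (0:Int) < 2),
        PySem.Int.floordiv_eq_ediv_of_pos (by norm_num : (0:Int) < 2)]
    simp only [E1]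
    exact hlist _ _ _ _ _ _ _ _ rfl (by omega) rfl (by omega)
  have m2 : (PySem.List.pyRange 1 (4*h_ - 3) 1).map (fun k =>
        [1, 4*h_ - 2 * PySem.Int.floordiv (k + 1) 2, 2, 4*h_ - 1 - 2 * PySem.Int.floordiv k 2])
      = (List.range (4*h_ - 4).toNat).map (fun k => E2 h_ (k+1)) := by
    rw [PySem.List.pyRange_one, hN, List.map_map]
    refine List.map_congr_left ?_
    intro k _
    simp only [Function.comp]
    rw [PySem.Int.floordiv_eq_ediv_of_pos (by norm_num : (0:Int) < 2),
        PySem.Int.floordiv_eq_ediv_of_pos (by norm_num : (0:Int) < 2)]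
    simp only [E2]
    exact hlist _ _ _ _ _ _ _ _ rfl (by omega) rfl (by omega)
  rw [m1, m2, rawA]

theorem firstB_eq (h_ : Int) : (rawA h_).map normEntryB = generateFirstPath h_ := by
  rw [gFP_eq]
  exact List.map_congr_left (fun e he => normEntryB_eq e (rawA_ne h_ e he))

theorem Bfun_at_zero (h_ : Int) (hh : 1 ≤ h_) :
    (generateFirstPath h_).map (fun entry =>
      normalizeEntry (entry.map (fun v => PySem.Int.mod (v - 1 + 2*0) (4*h_) + 1)))
      = generateFirstPath h_ := by
  have hstep : ∀ e ∈ generateFirstPath h_,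
      normalizeEntry (e.map (fun v => PySem.Int.mod (v - 1 + 2*0) (4*h_) + 1)) = e := by
    intro e he
    obtain ⟨hQ, hNorm⟩ := generateFirstPath_OK h_ hh e he
    have hmape : e.map (fun v => PySem.Int.mod (v - 1 + 2*0) (4*h_) + 1) = e := by
      have : ∀ v ∈ e, PySem.Int.mod (v - 1 + 2*0) (4*h_) + 1 = id v := by
        intro v hv
        have hb := hQ.2.2 v hv
        rw [PySem.Int.mod_eq_emod_of_pos (by omega), show v - 1 + 2*0 = v - 1 by ring,
          Int.emod_eq_of_lt (by omega) (by omega)]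
        simp
      rw [List.map_congr_left this, List.map_id]
    rw [hmape, hNorm]
  calc (generateFirstPath h_).map (fun entry =>
        normalizeEntry (entry.map (fun v => PySem.Int.mod (v - 1 + 2*0) (4*h_) + 1)))
      = (generateFirstPath h_).map id := List.map_congr_left (by
          intro e he; rw [hstep e he]; rfl)
    _ = generateFirstPath h_ := List.map_id _

theorem pathsAux (h_ : Int) (hh : 1 ≤ h_) :
    ∀ n : Nat, (n:Int) ≤ 2*h_ - 1 →
      (PySem.List.pyRange 1 (1 + (n:Int)) 1).foldl
        (fun paths i =>
          let prevPath := PySem.List.pyGetD paths (i - 1) []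
          let newPath := prevPath.map (fun t => processEntry t h_ (4*h_))
          paths ++ [newPath.map (fun t => normalizeEntry t)])
        [generateFirstPath h_]
      = (PySem.List.pyRange 0 (1 + (n:Int)) 1).map (fun i =>
          (generateFirstPath h_).map (fun entry =>
            normalizeEntry (entry.map (fun v => PySem.Int.mod (v - 1 + 2*i) (4*h_) + 1)))) := by
  intro n
  induction n with
  | zero =>
    intro _
    rw [show ((1:Int) + ((0:Nat):Int)) = 1 by norm_num]
    have r1 : PySem.List.pyRange 1 1 1 = [] := PySem.List.pyRange_one_eq_nil le_rfl
    have r0 : PySem.List.pyRange 0 1 1 = [(0:Int)] := by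
      have h01 := PySem.List.pyRange_one_singleton (a := (0:Int))
      norm_num at h01
      exact h01
    rw [r1, r0]
    simp only [List.foldl_nil, List.map_cons, List.map_nil]
    rw [Bfun_at_zero h_ hh]
  | succ n ih =>
    intro hn
    have hn' : (n:Int) ≤ 2*h_ - 1 := by push_cast at hn ⊢; omega
    have hsplit1 : PySem.List.pyRange 1 (1 + ((n+1 : Nat):Int)) 1
        = PySem.List.pyRange 1 (1 + (n:Int)) 1 ++ [1 + (n:Int)] := by
      push_cast
      rw [show (1:Int) + ((n:Int) + 1) = (1 + (n:Int)) + 1 by ring]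
      exact PySem.List.pyRange_one_succ_right (by omega)
    have hsplit0 : PySem.List.pyRange 0 (1 + ((n+1 : Nat):Int)) 1
        = PySem.List.pyRange 0 (1 + (n:Int)) 1 ++ [1 + (n:Int)] := by
      push_cast
      rw [show (1:Int) + ((n:Int) + 1) = (1 + (n:Int)) + 1 by ring]
      exact PySem.List.pyRange_one_succ_right (by omega)
    rw [hsplit1, hsplit0, List.foldl_append, ih hn', List.map_append]
    simp only [List.foldl_cons, List.foldl_nil, List.map_cons, List.map_nil]
    refine congrArg₂ (· ++ ·) rfl (congrArg (fun x => [x]) ?_)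
    rw [show (1 + (n:Int)) - 1 = (n:Int) by ring]
    rw [PySem.List.pyGetD_map_pyRange_of_nonneg _ (1 + (n:Int)) (n:Int) [] (by positivity) (by omega)]
    simp only [List.map_map]
    refine List.map_congr_left ?_
    intro e he
    obtain ⟨hQ, _⟩ := generateFirstPath_OK h_ hh e he
    simp only [Function.comp, processEntry]
    have hcs := chain_step h_ hh e hQ (2*(n:Int))
    rw [hcs]
    have hfe : (fun v => PySem.Int.mod (v - 1 + (2*(n:Int) + 2)) (4*h_) + 1)
        = (fun v => PySem.Int.mod (v - 1 + 2*(1 + (n:Int))) (4*h_) + 1) := by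
      funext v
      rw [show v - 1 + (2*(n:Int) + 2) = v - 1 + 2*(1 + (n:Int)) by ring]
    rw [hfe]

theorem generateAllPaths_eq (h_ : Int) : generateAllPaths h_ = generateAllPaths_alt h_ := by
  simp only [generateAllPaths, generateAllPaths_alt]
  rw [rawB_eq h_, firstB_eq h_]
  by_cases hh : 1 ≤ h_
  · have ht : (((2*h_ - 1).toNat : Nat) : Int) = 2*h_ - 1 := Int.toNat_of_nonneg (by omega)
    have key := pathsAux h_ hh (2*h_ - 1).toNat (by omega)
    rw [show (2*h_ : Int) = 1 + (((2*h_ - 1).toNat : Nat) : Int) by rw [ht]; ring]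
    rw [key]
    rw [PySem.List.pyRange_one_cons (by omega : (0:Int) < 1 + (((2*h_ - 1).toNat : Nat) : Int))]
    simp only [List.map_cons]
    rw [Bfun_at_zero h_ hh]
    show _ = _ ++ _
    rw [List.singleton_append]
    congr 1
    refine List.map_congr_left ?_
    intro i _
    refine List.map_congr_left ?_
    intro e he
    have hQ := (generateFirstPath_OK h_ hh e he).1
    exact (normEntryB_eq _ (fun hc => hQ.1 (List.map_eq_nil_iff.mp hc))).symm
  · rw [PySem.List.pyRange_one_eq_nil (show (2*h_:Int) ≤ 1 by omega)]
    simp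

-- ===== VERDICT (by name: the statement is the Claim_ definition above) =====
theorem generateAllPaths_spec : Claim_equal_generateAllPaths := by
  intro h_ _
  show generateAllPaths h_ = generateAllPaths_alt h_
  exact generateAllPaths_eq h_
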